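-- pv_equiv track=rewrite | github.com/drbwork-source/boardgame | board_core.py | check_pathability
-- ===== SOURCE A (Python) =====
-- from collections import defaultdict, deque
-- from typing import Any, Sequence
--
-- CellType = str
--
-- Board = list[list[CellType]]
--
-- GOAL_SYMBOL: CellType = "G"
--
-- START_SYMBOLS: list[CellType] = ["1", "2", "3", "4"]
--
-- BLOCKED_TILES: set[CellType] = {"W"}
--
-- def neighbors(x: int, y: int, width: int, height: int) -> Sequence[tuple[int, int]]:
--     out: list[tuple[int, int]] = []
--     for dy in (-1, 0, 1):
--         for dx in (-1, 0, 1):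
--             if dx == 0 and dy == 0:
--                 continue
--             nx, ny = x + dx, y + dy
--             if 0 <= nx < width and 0 <= ny < height:
--                 out.append((nx, ny))
--     return out
--
-- def _is_walkable(symbol: CellType) -> bool:
--     return symbol not in BLOCKED_TILES
--
-- _START_INDEX: dict[CellType, int] = {s: i for i, s in enumerate(START_SYMBOLS)}
--
-- def _find_goal_and_starts(board: Board) -> tuple[tuple[int, int] | None, list[tuple[int, int]]]:
--     goal_xy = None
--     starts: list[tuple[int, int] | None] = [None] * len(START_SYMBOLS)
--     h, w = len(board), len(board[0]) if board else 0
--     for y in range(h):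
--         for x in range(w):
--             c = board[y][x]
--             if c == GOAL_SYMBOL:
--                 goal_xy = (x, y)
--             elif c in _START_INDEX:
--                 starts[_START_INDEX[c]] = (x, y)
--     return goal_xy, [s for s in starts if s is not None]
--
-- def _bfs_reachable(board: Board, start_xy: tuple[int, int], goal_xy: tuple[int, int]) -> bool:
--     h, w = len(board), len(board[0]) if board else 0
--     if not h or not w:
--         return False
--     seen = {start_xy}
--     q = deque([start_xy])
--     while q:
--         x, y = q.popleft()
--         if (x, y) == goal_xy:
--             return True
--         for nx, ny in neighbors(x, y, w, h):
--             if (nx, ny) in seen or not _is_walkable(board[ny][nx]):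
--                 continue
--             seen.add((nx, ny))
--             q.append((nx, ny))
--     return False
--
-- def check_pathability(board: Board) -> tuple[bool, list[int]]:
--     """
--     Check whether all start positions can reach the goal.
--     Returns (all_reachable, list of unreachable start indices).
--     """
--     goal_xy, start_positions = _find_goal_and_starts(board)
--     if goal_xy is None or not start_positions:
--         return True, []
--     unreachable: list[int] = []
--     for i, start_xy in enumerate(start_positions):
--         if not _bfs_reachable(board, start_xy, goal_xy):
--             unreachable.append(i)
--     return len(unreachable) == 0, unreachable
-- ===== SOURCE B (Python) =====
-- GOAL_SYMBOL = "G"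
-- START_SYMBOLS = ["1", "2", "3", "4"]
-- BLOCKED_TILES = {"W"}
--
--
-- def check_pathability(board):
--     h = len(board)
--     w = len(board[0]) if board else 0
--
--     def last_pos(sym):
--         p = None
--         for y in range(h):
--             for x in range(w):
--                 if board[y][x] == sym:
--                     p = (x, y)
--         return p
--
--     goal = last_pos(GOAL_SYMBOL)
--     starts = [p for p in (last_pos(s) for s in START_SYMBOLS) if p is not None]
--     if goal is None or not starts:
--         return True, []
--     # round-based closure from the goal: a walkable cell joins the set as soon
--     # as it is 8-adjacent to a cell already in the set; repeat until stable
--     reach = {goal}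
--     changed = True
--     while changed:
--         changed = False
--         for y in range(h):
--             for x in range(w):
--                 if (x, y) not in reach and board[y][x] not in BLOCKED_TILES and any(
--                     (x + dx, y + dy) in reach
--                     for dx in (-1, 0, 1)
--                     for dy in (-1, 0, 1)
--                 ):
--                     reach.add((x, y))
--                     changed = True
--     unreachable = [i for i, s in enumerate(starts) if s not in reach]
--     return not unreachable, unreachable
-- ===== Notes on version B (the rewrite author's own statement) =====
-- stated objective: alternative
-- what changed: Replaces the per-start goal-directed queue BFS with a queue-free round-based fixed-point closure flooded once from the goal (rescan the grid adding walkable cells 8-adjacent to the set until nothing changes; reachability on walkable cells is symmetric), and replaces the single slot-array symbol scan by one last-occurrence scan per symbol.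
import Mathlib
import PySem

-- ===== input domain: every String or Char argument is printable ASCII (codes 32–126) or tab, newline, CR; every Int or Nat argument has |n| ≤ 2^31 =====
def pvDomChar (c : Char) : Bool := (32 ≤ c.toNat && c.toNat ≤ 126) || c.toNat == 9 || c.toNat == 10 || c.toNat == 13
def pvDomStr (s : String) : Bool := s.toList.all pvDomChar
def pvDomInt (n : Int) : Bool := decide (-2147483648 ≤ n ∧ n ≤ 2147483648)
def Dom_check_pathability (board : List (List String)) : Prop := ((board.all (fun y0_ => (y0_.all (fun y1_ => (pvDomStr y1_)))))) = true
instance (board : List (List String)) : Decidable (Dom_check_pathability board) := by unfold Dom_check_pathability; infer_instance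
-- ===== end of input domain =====

-- B replaces A's per-start goal-directed queue BFS by a single queue-free round-based
-- fixed-point closure flooded from the goal (rescan the grid adding walkable 8-adjacent
-- cells until stable; reachability over walkable cells is symmetric), and replaces A's
-- single slot-array symbol scan by one last-occurrence scan per symbol (alternative
-- decomposition, equal results).

-- ===== PORT A =====
-- board[y][x]; both ports read cells only with indices guarded in range (loop bounds /
-- neighbor bounds checks), where List.getD is exact for Python indexing.
def pvCell (board : List (List String)) (x y : Int) : String :=
  (board.getD y.toNat []).getD x.toNat ""

-- h, w = len(board), len(board[0]) if board else 0
def boardH (board : List (List String)) : Int := board.length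

def boardW (board : List (List String)) : Int :=
  if board ≠ [] then ((board.headD []).length : Int) else 0

-- module helper `neighbors` (used by A)
def neighbors (x y width height : Int) : List (Int × Int) :=
  ([-1, 0, 1] : List Int).foldl (fun out dy =>
    ([-1, 0, 1] : List Int).foldl (fun out dx =>
      if dx = 0 ∧ dy = 0 then out
      else
        let nx := x + dx
        let ny := y + dy
        if 0 ≤ nx ∧ nx < width ∧ 0 ≤ ny ∧ ny < height then out ++ [(nx, ny)] else out) out) []

-- _is_walkable: symbol not in BLOCKED_TILES = {"W"}
def isWalkable (symbol : String) : Bool := !(symbol == "W")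

-- START_SYMBOLS
def startSymbols : List String := ["1", "2", "3", "4"]

-- _START_INDEX = {s: i for i, s in enumerate(START_SYMBOLS)}
def startIndex : PySem.Dict String Int :=
  (PySem.List.enumerate startSymbols 0).foldl (fun d p => d.insert p.2 p.1) PySem.Dict.empty

-- _find_goal_and_starts
def findGoalStarts (board : List (List String)) :
    Option (Int × Int) × List (Int × Int) :=
  let st :=
    (PySem.List.pyRange 0 (boardH board) 1).foldl (fun st y =>
      (PySem.List.pyRange 0 (boardW board) 1).foldl (fun st x =>
        let c := pvCell board x y
        if c == "G" then (some (x, y), st.2)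
        else
          match startIndex.get? c with
          | some i => (st.1, st.2.set i.toNat (some (x, y)))
          | none => st) st)
      ((none : Option (Int × Int)), ([none, none, none, none] : List (Option (Int × Int))))
  (st.1, st.2.filterMap id)

-- ---- termination helpers for the BFS / closure loops (cited by `decreasing_by`) ----
def gridList (w h : Int) : List (Int × Int) :=
  (PySem.List.pyRange 0 h 1).flatMap (fun y => (PySem.List.pyRange 0 w 1).map (fun x => (x, y)))

def unseenCount (w h : Int) (seen : List (Int × Int)) : Nat :=
  ((gridList w h).filter (fun p => !(seen.contains p))).length

theorem mem_ite_singleton {α : Type} {c : Prop} [Decidable c] {a n : α} :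
    n ∈ (if c then [a] else ([] : List α)) ↔ c ∧ n = a := by
  split_ifs with hc <;> simp [hc]

theorem mem_gridList {w h : Int} {p : Int × Int} :
    p ∈ gridList w h ↔ 0 ≤ p.1 ∧ p.1 < w ∧ 0 ≤ p.2 ∧ p.2 < h := by
  rcases p with ⟨a, b⟩
  simp only [gridList, List.mem_flatMap, List.mem_map, PySem.List.mem_pyRange_one]
  constructor
  · rintro ⟨y, hy, x, hx, he⟩
    injection he with e1 e2
    omega
  · rintro ⟨h1, h2, h3, h4⟩
    exact ⟨b, by omega, a, by omega, rfl⟩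

def nbrOffs (x y w h dy : Int) : List (Int × Int) :=
  ([-1, 0, 1] : List Int).flatMap (fun dx =>
    if dx = 0 ∧ dy = 0 then []
    else if 0 ≤ x + dx ∧ x + dx < w ∧ 0 ≤ y + dy ∧ y + dy < h then [(x + dx, y + dy)]
    else [])

theorem neighbors_eq_flatMap (x y w h : Int) :
    neighbors x y w h = ([-1, 0, 1] : List Int).flatMap (nbrOffs x y w h) := by
  unfold neighbors
  refine Eq.trans (PySem.List.foldl_congr_mem _ _
    (fun (out : List (Int × Int)) (dy : Int) => out ++ nbrOffs x y w h dy)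
    _ (fun out dy _ => ?_)) ?_
  · refine Eq.trans (PySem.List.foldl_congr_mem _ _
      (fun (acc : List (Int × Int)) (dx : Int) =>
        acc ++ (if dx = 0 ∧ dy = 0 then []
          else if 0 ≤ x + dx ∧ x + dx < w ∧ 0 ≤ y + dy ∧ y + dy < h then [(x + dx, y + dy)]
          else [])) _ (fun acc dx _ => ?_)) ?_
    · by_cases hc0 : dx = 0 ∧ dy = 0
      · simp [hc0]
      · by_cases hb : 0 ≤ x + dx ∧ x + dx < w ∧ 0 ≤ y + dy ∧ y + dy < h
        · simp [hc0, hb]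
        · simp [hc0, hb]
    · rw [PySem.List.foldl_append_eq_flatMap]
      simp [nbrOffs]
  · rw [PySem.List.foldl_append_eq_flatMap]
    simp

theorem mem_neighbors {x y w h : Int} {n : Int × Int} :
    n ∈ neighbors x y w h ↔
      ¬(n.1 = x ∧ n.2 = y) ∧ x - 1 ≤ n.1 ∧ n.1 ≤ x + 1 ∧ y - 1 ≤ n.2 ∧ n.2 ≤ y + 1 ∧
        0 ≤ n.1 ∧ n.1 < w ∧ 0 ≤ n.2 ∧ n.2 < h := by
  rcases n with ⟨a, b⟩
  rw [neighbors_eq_flatMap]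
  simp only [nbrOffs, List.mem_flatMap, List.mem_cons, List.not_mem_nil, or_false]
  constructor
  · rintro ⟨dy, hdy, dx, hdx, hm⟩
    rcases hdy with rfl | rfl | rfl <;> rcases hdx with rfl | rfl | rfl <;>
      simp only [mem_ite_singleton, Prod.mk.injEq, show ¬((-1 : Int) = 0) by norm_num,
        show ¬((1 : Int) = 0) by norm_num, and_true, and_false,
        if_true, if_false, List.not_mem_nil] at hm <;>
      omega
  · rintro ⟨hne, h1, h2, h3, h4, h5, h6, h7, h8⟩
    refine ⟨b - y, by omega, a - x, by omega, ?_⟩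
    have hcond : ¬(a - x = 0 ∧ b - y = 0) := by omega
    rw [if_neg hcond]
    have hx' : x + (a - x) = a := by omega
    rw [hx']
    have hy' : y + (b - y) = b := by omega
    rw [hy']
    rw [if_pos ⟨h5, h6, h7, h8⟩]
    simp

theorem neighbors_subset_grid {x y w h : Int} {n : Int × Int}
    (hn : n ∈ neighbors x y w h) : n ∈ gridList w h := by
  rw [mem_gridList]
  have := mem_neighbors.mp hn
  tauto

-- inner for-loop of A's BFS over the neighbor list
def expandA (board : List (List String)) (ns : List (Int × Int))
    (seen q : List (Int × Int)) : List (Int × Int) × List (Int × Int) :=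
  ns.foldl (fun st n =>
    if st.1.contains n || !(isWalkable (pvCell board n.1 n.2)) then st
    else (PySem.Set.add st.1 n, st.2 ++ [n])) (seen, q)

theorem expandA_cons (board : List (List String)) (n : Int × Int) (ns : List (Int × Int))
    (seen q : List (Int × Int)) :
    expandA board (n :: ns) seen q =
      if seen.contains n || !(isWalkable (pvCell board n.1 n.2)) then
        expandA board ns seen q
      else expandA board ns (PySem.Set.add seen n) (q ++ [n]) := by
  by_cases hc : n ∈ seen ∨ isWalkable (pvCell board n.1 n.2) = false
  · simp [expandA, hc]
  · simp [expandA, hc]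

theorem unseen_append_lt {w h : Int} {seen : List (Int × Int)} {n : Int × Int}
    (hg : n ∈ gridList w h) (hn : seen.contains n = false) :
    unseenCount w h (seen ++ [n]) < unseenCount w h seen := by
  unfold unseenCount
  have hsub : List.Sublist ((gridList w h).filter (fun p => !((seen ++ [n]).contains p)))
      ((gridList w h).filter (fun p => !(seen.contains p))) := by
    apply List.monotone_filter_right
    intro a ha
    simp only [List.contains_append, Bool.not_eq_true', Bool.or_eq_false_iff] at *
    exact ha.1
  have hnm : n ∉ seen := by simpa using hn
  refine Nat.lt_of_le_of_ne hsub.length_le (fun he => ?_)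
  have heq := hsub.eq_of_length he
  have hmem : n ∈ (gridList w h).filter (fun p => !(seen.contains p)) := by
    simp [List.mem_filter, hg, hnm]
  rw [← heq] at hmem
  simp [List.mem_filter] at hmem

theorem expandA_measure (board : List (List String)) (w h : Int)
    (ns : List (Int × Int)) (hns : ∀ n ∈ ns, n ∈ gridList w h) :
    ∀ seen q : List (Int × Int),
      2 * unseenCount w h (expandA board ns seen q).1 + (expandA board ns seen q).2.length
        ≤ 2 * unseenCount w h seen + q.length := by
  induction ns with
  | nil => intro seen q; simp [expandA]
  | cons n ns ih =>
    intro seen q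
    have hg : n ∈ gridList w h := hns n (by simp)
    have hns' : ∀ m ∈ ns, m ∈ gridList w h := fun m hm => hns m (by simp [hm])
    rw [expandA_cons]
    by_cases hc : (seen.contains n || !(isWalkable (pvCell board n.1 n.2))) = true
    · rw [if_pos hc]; exact ih hns' seen q
    · rw [if_neg hc]
      have hc' := hc
      simp only [Bool.or_eq_true, Bool.not_eq_true', not_or] at hc'
      have hnm : n ∉ seen := fun hm => hc'.1 (by simpa using hm)
      have hcon : seen.contains n = false := by simpa using hnm
      have hadd : PySem.Set.add seen n = seen ++ [n] := by
        simp [PySem.Set.add, hnm]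
      rw [hadd]
      have h1 := ih hns' (seen ++ [n]) (q ++ [n])
      have h2 := unseen_append_lt (w := w) (h := h) hg hcon
      have h3 : (q ++ [n]).length = q.length + 1 := by simp
      omega

-- _bfs_reachable's while-loop (FIFO queue, early return on popping the goal)
def loopA (board : List (List String)) (w h : Int) (goal : Int × Int)
    (seen q : List (Int × Int)) : Bool :=
  match q with
  | [] => false
  | p :: rest =>
    if p = goal then true
    else
      let st := expandA board (neighbors p.1 p.2 w h) seen rest
      loopA board w h goal st.1 st.2
termination_by 2 * unseenCount w h seen + q.length
decreasing_by
  have := expandA_measure board w h (neighbors p.1 p.2 w h)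
    (fun n hn => neighbors_subset_grid hn) seen rest
  simp only [List.length_cons]
  omega

-- _bfs_reachable
def bfsA (board : List (List String)) (start goal : Int × Int) : Bool :=
  if boardH board = 0 ∨ boardW board = 0 then false
  else loopA board (boardW board) (boardH board) goal [start] [start]

def check_pathability (board : List (List String)) : Bool × List Int :=
  let gs := findGoalStarts board
  match gs.1 with
  | none => (true, [])
  | some goal =>
    if gs.2 = [] then (true, [])
    else
      let unreachable : List Int :=
        (PySem.List.enumerate gs.2 0).foldl (fun acc p =>
          if !(bfsA board p.2 goal) then acc ++ [p.1] else acc) []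
      (unreachable.length == 0, unreachable)

-- ===== PORT B =====
-- last_pos(sym): last scan-order occurrence of a symbol
def lastPos (board : List (List String)) (w h : Int) (sym : String) : Option (Int × Int) :=
  (PySem.List.pyRange 0 h 1).foldl (fun p y =>
    (PySem.List.pyRange 0 w 1).foldl (fun p x =>
      if pvCell board x y == sym then some (x, y) else p) p) none

-- any((x+dx, y+dy) in reach for dx in (-1,0,1) for dy in (-1,0,1))
def adjAny (reach : List (Int × Int)) (x y : Int) : Bool :=
  ([-1, 0, 1] : List Int).any (fun dx =>
    ([-1, 0, 1] : List Int).any (fun dy => reach.contains (x + dx, y + dy)))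

-- the body of one `for y: for x:` sweep at one cell (state = (reach, changed))
def sweepStep (board : List (List String)) (st : List (Int × Int) × Bool)
    (c : Int × Int) : List (Int × Int) × Bool :=
  if !(st.1.contains c) && !(pvCell board c.1 c.2 == "W") && adjAny st.1 c.1 c.2 then
    (PySem.Set.add st.1 c, true)
  else st

-- one full grid sweep (the inner double for-loop of the while)
def sweep (board : List (List String)) (w h : Int)
    (st : List (Int × Int) × Bool) : List (Int × Int) × Bool :=
  (PySem.List.pyRange 0 h 1).foldl (fun st y =>
    (PySem.List.pyRange 0 w 1).foldl (fun st x => sweepStep board st (x, y)) st) st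

-- generic nested x/y fold = fold over the cell list (cited by sweep_eq_grid below)
theorem nested_fold_eq {σ : Type} (w h : Int) (f : σ → Int × Int → σ) (init : σ) :
    (PySem.List.pyRange 0 h 1).foldl (fun s y =>
      (PySem.List.pyRange 0 w 1).foldl (fun s x => f s (x, y)) s) init =
    (gridList w h).foldl f init := by
  unfold gridList
  rw [List.foldl_flatMap]
  simp only [List.foldl_map]

theorem sweep_eq_grid (board : List (List String)) (w h : Int)
    (st : List (Int × Int) × Bool) :
    sweep board w h st = (gridList w h).foldl (sweepStep board) st :=
  nested_fold_eq w h (sweepStep board) st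

-- the measure lemma the while-loop's termination cites
theorem cellFold_measure (board : List (List String)) (w h : Int) :
    ∀ (cells : List (Int × Int)), (∀ c ∈ cells, c ∈ gridList w h) →
      ∀ st : List (Int × Int) × Bool,
        unseenCount w h (cells.foldl (sweepStep board) st).1 ≤ unseenCount w h st.1 ∧
        ((cells.foldl (sweepStep board) st).2 = true →
          st.2 = true ∨ unseenCount w h (cells.foldl (sweepStep board) st).1 < unseenCount w h st.1) := by
  intro cells
  induction cells with
  | nil => intro _ st; exact ⟨le_refl _, fun h2 => Or.inl h2⟩
  | cons c cs ih =>
    intro hcg st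
    have hcg' : ∀ d ∈ cs, d ∈ gridList w h := fun d hd => hcg d (by simp [hd])
    simp only [List.foldl_cons]
    by_cases hc : (!(st.1.contains c) && !(pvCell board c.1 c.2 == "W") && adjAny st.1 c.1 c.2) = true
    · have hst' : sweepStep board st c = (st.1 ++ [c], true) := by
        have hnm : c ∉ st.1 := by
          simp only [Bool.and_eq_true, Bool.not_eq_true'] at hc
          simpa using hc.1.1
        unfold sweepStep
        rw [if_pos hc]
        simp [PySem.Set.add, hnm]
      rw [hst']
      obtain ⟨m1, m2⟩ := ih hcg' (st.1 ++ [c], true)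
      have epr : ((st.1 ++ [c], true) : List (Int × Int) × Bool).1 = st.1 ++ [c] := rfl
      rw [epr] at m1 m2
      have hlt : unseenCount w h (st.1 ++ [c]) < unseenCount w h st.1 := by
        apply unseen_append_lt (hcg c (by simp))
        simp only [Bool.and_eq_true, Bool.not_eq_true'] at hc
        exact hc.1.1
      exact ⟨by omega, fun _ => Or.inr (by omega)⟩
    · have hst' : sweepStep board st c = st := by unfold sweepStep; rw [if_neg hc]
      rw [hst']
      exact ih hcg' st

-- B's while-loop: repeat sweeps until a sweep changes nothing
def closureLoop (board : List (List String)) (w h : Int)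
    (reach : List (Int × Int)) : List (Int × Int) :=
  let st := sweep board w h (reach, false)
  if st.2 then closureLoop board w h st.1 else st.1
termination_by unseenCount w h reach
decreasing_by
  rename_i hch
  have hch' : (sweep board w h (reach, false)).2 = true := hch
  rw [sweep_eq_grid] at hch' ⊢
  have := cellFold_measure board w h (gridList w h) (fun c hc => hc) (reach, false)
  rcases this.2 hch' with h1 | h1
  · cases h1
  · exact h1

def check_pathability_alt (board : List (List String)) : Bool × List Int :=
  let h := boardH board
  let w := boardW board
  let goal? := lastPos board w h "G"
  let starts := (startSymbols.map (fun s => lastPos board w h s)).filterMap id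
  match goal? with
  | none => (true, [])
  | some goal =>
    if starts = [] then (true, [])
    else
      let reach := closureLoop board w h [goal]
      let unreachable : List Int :=
        ((PySem.List.enumerate starts 0).filter (fun p => !(reach.contains p.2))).map (·.1)
      (unreachable.isEmpty, unreachable)

-- ===== PRECONDITION & SPEC =====
-- Pre_ excludes exactly the boards on which Python A raises IndexError: a row shorter than the
-- first row (the scan reads board[y][x] for every x < len(board[0]) in every row).
def Pre_check_pathability (board : List (List String)) : Prop :=
  ∀ row ∈ board, (board.headD []).length ≤ row.length
instance (board : List (List String)) : Decidable (Pre_check_pathability board) := by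
  unfold Pre_check_pathability; infer_instance

def pvWitness_check_pathability : List (List String) := [["1", ".", "G"], ["W", "2", "."]]

def Spec_check_pathability (board : List (List String)) (out : Bool × List Int) : Prop :=
  out = check_pathability_alt board
instance (board : List (List String)) (out : Bool × List Int) :
    Decidable (Spec_check_pathability board out) := by
  unfold Spec_check_pathability; infer_instance

-- ===== CLAIM (what is proved, stated in full; the proofs are below) =====
def Claim_equal_check_pathability : Prop :=
  ∀ (board : List (List String)), Dom_check_pathability board →
    Pre_check_pathability board →
    Spec_check_pathability board (check_pathability board)

-- ===== LEMMAS AND PROOFS =====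

-- one BFS step: the target is an in-bounds neighbor of the source and its cell is walkable
def StepR (board : List (List String)) (w h : Int) (p q : Int × Int) : Prop :=
  q ∈ neighbors p.1 p.2 w h ∧ isWalkable (pvCell board q.1 q.2) = true

def Reach (board : List (List String)) (w h : Int) (p q : Int × Int) : Prop :=
  Relation.ReflTransGen (StepR board w h) p q

theorem reach_mem_closed {board : List (List String)} {w h : Int}
    {S : List (Int × Int)} (hS : ∀ p ∈ S, ∀ n, StepR board w h p n → n ∈ S)
    {p q : Int × Int} (hp : p ∈ S) (hr : Reach board w h p q) : q ∈ S := by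
  induction hr with
  | refl => exact hp
  | tail _ hstep ih => exact hS _ ih _ hstep

theorem expandA_spec (board : List (List String)) (ns : List (Int × Int)) :
    ∀ seen q : List (Int × Int),
      (∀ z, z ∈ (expandA board ns seen q).1 ↔
          z ∈ seen ∨ (z ∈ ns ∧ isWalkable (pvCell board z.1 z.2) = true)) ∧
      (∀ z ∈ (expandA board ns seen q).1, z ∈ seen ∨ z ∈ (expandA board ns seen q).2) ∧
      (∀ z ∈ (expandA board ns seen q).2,
          z ∈ q ∨ (z ∈ ns ∧ isWalkable (pvCell board z.1 z.2) = true)) ∧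
      (∀ z ∈ q, z ∈ (expandA board ns seen q).2) := by
  induction ns with
  | nil =>
    intro seen q
    exact ⟨fun z => by simp [expandA], fun z hz => Or.inl (by simpa [expandA] using hz),
      fun z hz => Or.inl (by simpa [expandA] using hz), fun z hz => by simpa [expandA] using hz⟩
  | cons n ns ih =>
    intro seen q
    rw [expandA_cons]
    by_cases hc : (seen.contains n || !(isWalkable (pvCell board n.1 n.2))) = true
    · rw [if_pos hc]
      obtain ⟨i1, i2, i3, i4⟩ := ih seen q
      have hcase : n ∈ seen ∨ isWalkable (pvCell board n.1 n.2) = false := by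
        rcases Bool.or_eq_true_iff.mp hc with hcs | hw
        · exact Or.inl (by simpa using hcs)
        · exact Or.inr (by simpa using hw)
      refine ⟨fun z => ?_, i2, fun z hz => ?_, i4⟩
      · rw [i1 z]
        constructor
        · rintro (hz | ⟨hzn, hw⟩)
          · exact Or.inl hz
          · exact Or.inr ⟨List.mem_cons_of_mem _ hzn, hw⟩
        · rintro (hz | ⟨hzn, hw⟩)
          · exact Or.inl hz
          · rcases List.mem_cons.mp hzn with rfl | hzn'
            · rcases hcase with hs | hnw
              · exact Or.inl hs
              · rw [hw] at hnw; cases hnw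
            · exact Or.inr ⟨hzn', hw⟩
      · rcases i3 z hz with hq | ⟨hzn, hw⟩
        · exact Or.inl hq
        · exact Or.inr ⟨List.mem_cons_of_mem _ hzn, hw⟩
    · rw [if_neg hc]
      have hc' := hc
      simp only [Bool.or_eq_true, Bool.not_eq_true', not_or] at hc'
      have hnm : n ∉ seen := fun hm => hc'.1 (by simpa using hm)
      have hw : isWalkable (pvCell board n.1 n.2) = true := by
        cases hwc : isWalkable (pvCell board n.1 n.2)
        · exact absurd hwc hc'.2
        · rfl
      have hadd : PySem.Set.add seen n = seen ++ [n] := by simp [PySem.Set.add, hnm]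
      rw [hadd]
      obtain ⟨i1, i2, i3, i4⟩ := ih (seen ++ [n]) (q ++ [n])
      refine ⟨fun z => ?_, fun z hz => ?_, fun z hz => ?_,
        fun z hz => i4 z (List.mem_append.mpr (Or.inl hz))⟩
      · rw [i1 z]
        simp only [List.mem_append, List.mem_cons, List.not_mem_nil, or_false]
        constructor
        · rintro ((hz | rfl) | ⟨hzn, hw'⟩)
          · exact Or.inl hz
          · exact Or.inr ⟨Or.inl rfl, hw⟩
          · exact Or.inr ⟨Or.inr hzn, hw'⟩
        · rintro (hz | ⟨rfl | hzn, hw'⟩)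
          · exact Or.inl (Or.inl hz)
          · exact Or.inl (Or.inr rfl)
          · exact Or.inr ⟨hzn, hw'⟩
      · rcases i2 z hz with hs | hq
        · rcases List.mem_append.mp hs with hs' | hs1
          · exact Or.inl hs'
          · exact Or.inr (i4 z (List.mem_append.mpr (Or.inr hs1)))
        · exact Or.inr hq
      · rcases i3 z hz with hq | ⟨hzn, hw'⟩
        · rcases List.mem_append.mp hq with h1 | h1
          · exact Or.inl h1
          · have hzn' : z = n := List.mem_singleton.mp h1
            subst hzn'
            exact Or.inr ⟨List.mem_cons_self, hw⟩
        · exact Or.inr ⟨List.mem_cons_of_mem _ hzn, hw'⟩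

theorem loopA_base (board : List (List String)) (w h : Int) (goal : Int × Int)
    (seen : List (Int × Int))
    (hI1 : ∀ p ∈ seen, p ∉ ([] : List (Int × Int)) →
      p ≠ goal ∧ ∀ n, StepR board w h p n → n ∈ seen) :
    (loopA board w h goal seen [] = true ↔ ∃ p ∈ seen, Reach board w h p goal) := by
  rw [loopA]
  constructor
  · intro hfalse; cases hfalse
  · rintro ⟨p, hp, hr⟩
    have hcl : ∀ a ∈ seen, ∀ n, StepR board w h a n → n ∈ seen :=
      fun a ha => (hI1 a ha (by simp)).2
    exact absurd rfl (hI1 goal (reach_mem_closed hcl hp hr) (by simp)).1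

theorem loopA_correct (board : List (List String)) (w h : Int) (goal : Int × Int) :
    ∀ (N : Nat) (seen q : List (Int × Int)),
      2 * unseenCount w h seen + q.length ≤ N →
      (∀ p ∈ seen, p ∉ q → p ≠ goal ∧ ∀ n, StepR board w h p n → n ∈ seen) →
      (∀ p ∈ q, p ∈ seen) →
      (loopA board w h goal seen q = true ↔ ∃ p ∈ seen, Reach board w h p goal) := by
  intro N
  induction N with
  | zero =>
    intro seen q hN hI1 _
    have hq : q = [] := by
      cases q with
      | nil => rfl
      | cons a l => simp [List.length_cons] at hN
    subst hq
    exact loopA_base board w h goal seen hI1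
  | succ N ih =>
    intro seen q hN hI1 hI2
    cases q with
    | nil => exact loopA_base board w h goal seen hI1
    | cons p rest =>
      by_cases hpg : p = goal
      · subst hpg
        rw [loopA]
        rw [if_pos rfl]
        exact ⟨fun _ => ⟨p, hI2 p (by simp), Relation.ReflTransGen.refl⟩, fun _ => rfl⟩
      · have hrec : loopA board w h goal seen (p :: rest) =
            loopA board w h goal (expandA board (neighbors p.1 p.2 w h) seen rest).1
              (expandA board (neighbors p.1 p.2 w h) seen rest).2 := by
          rw [loopA]
          simp only [if_neg hpg]
        obtain ⟨e1, e2, e3, e4⟩ := expandA_spec board (neighbors p.1 p.2 w h) seen rest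
        have hI1' : ∀ z ∈ (expandA board (neighbors p.1 p.2 w h) seen rest).1,
            z ∉ (expandA board (neighbors p.1 p.2 w h) seen rest).2 →
            z ≠ goal ∧ ∀ n, StepR board w h z n →
              n ∈ (expandA board (neighbors p.1 p.2 w h) seen rest).1 := by
          intro z hz hznq
          rcases e2 z hz with hzs | hzq
          · by_cases hzp : z = p
            · subst hzp
              exact ⟨hpg, fun n hn => (e1 n).mpr (Or.inr ⟨hn.1, hn.2⟩)⟩
            · have hzrest : z ∉ rest := fun hzr => hznq (e4 z hzr)
              have hznq' : z ∉ p :: rest := by simp [hzp, hzrest]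
              obtain ⟨hzg, hcl⟩ := hI1 z hzs hznq'
              exact ⟨hzg, fun n hn => (e1 n).mpr (Or.inl (hcl n hn))⟩
          · exact absurd hzq hznq
        have hI2' : ∀ z ∈ (expandA board (neighbors p.1 p.2 w h) seen rest).2,
            z ∈ (expandA board (neighbors p.1 p.2 w h) seen rest).1 := by
          intro z hz
          rcases e3 z hz with hzrest | ⟨hzn, hzw⟩
          · exact (e1 z).mpr (Or.inl (hI2 z (List.mem_cons_of_mem _ hzrest)))
          · exact (e1 z).mpr (Or.inr ⟨hzn, hzw⟩)
        have hNle : 2 * unseenCount w h (expandA board (neighbors p.1 p.2 w h) seen rest).1 +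
            (expandA board (neighbors p.1 p.2 w h) seen rest).2.length ≤ N := by
          have := expandA_measure board w h (neighbors p.1 p.2 w h)
            (fun n hn => neighbors_subset_grid hn) seen rest
          simp only [List.length_cons] at hN
          omega
        rw [hrec, ih _ _ hNle hI1' hI2']
        constructor
        · rintro ⟨z, hz, hrz⟩
          rcases (e1 z).mp hz with hzs | ⟨hzn, hzw⟩
          · exact ⟨z, hzs, hrz⟩
          · exact ⟨p, hI2 p (by simp), Relation.ReflTransGen.head ⟨hzn, hzw⟩ hrz⟩
        · rintro ⟨z, hz, hrz⟩
          exact ⟨z, (e1 z).mpr (Or.inl hz), hrz⟩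

-- ---- B's closure loop computes exactly the set reachable from the goal ----

theorem adjAny_iff {reach : List (Int × Int)} {x y : Int} :
    adjAny reach x y = true ↔
      ∃ dx ∈ ([-1, 0, 1] : List Int), ∃ dy ∈ ([-1, 0, 1] : List Int),
        (x + dx, y + dy) ∈ reach := by
  simp [adjAny]

theorem cellFold_mono (board : List (List String)) :
    ∀ (cells : List (Int × Int)) (st : List (Int × Int) × Bool) (z : Int × Int),
      z ∈ st.1 → z ∈ (cells.foldl (sweepStep board) st).1 := by
  intro cells
  induction cells with
  | nil => intro st z hz; exact hz
  | cons c cs ih =>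
    intro st z hz
    simp only [List.foldl_cons]
    apply ih
    unfold sweepStep
    split_ifs with hc
    · simp [PySem.Set.add]
      split_ifs <;> simp [hz]
    · exact hz

theorem cellFold_sound (board : List (List String)) (w h : Int) (goal : Int × Int) :
    ∀ (cells : List (Int × Int)), (∀ c ∈ cells, c ∈ gridList w h) →
      ∀ st : List (Int × Int) × Bool, (∀ z ∈ st.1, Reach board w h goal z) →
        ∀ z ∈ (cells.foldl (sweepStep board) st).1, Reach board w h goal z := by
  intro cells
  induction cells with
  | nil => intro _ st hst z hz; exact hst z hz
  | cons c cs ih =>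
    intro hcg st hst
    simp only [List.foldl_cons]
    apply ih (fun d hd => hcg d (by simp [hd]))
    intro z hz
    unfold sweepStep at hz
    split_ifs at hz with hc
    · simp only [Bool.and_eq_true, Bool.not_eq_true'] at hc
      obtain ⟨⟨hnm, hwk⟩, hadj⟩ := hc
      have hnm' : c ∉ st.1 := by simpa using hnm
      have hze : z ∈ st.1 ∨ z = c := by
        have : PySem.Set.add st.1 c = st.1 ++ [c] := by simp [PySem.Set.add, hnm']
        rw [this] at hz
        simpa using hz
      rcases hze with hz1 | hzc
      · exact hst z hz1
      · subst hzc
        obtain ⟨dx, hdx, dy, hdy, hp⟩ := adjAny_iff.mp hadj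
        have hgr : z ∈ gridList w h := hcg z (by simp)
        rw [mem_gridList] at hgr
        have hdx' : dx = -1 ∨ dx = 0 ∨ dx = 1 := by simpa using hdx
        have hdy' : dy = -1 ∨ dy = 0 ∨ dy = 1 := by simpa using hdy
        have hcp : z ≠ (z.1 + dx, z.2 + dy) := by
          intro he
          rw [← he] at hp
          exact hnm' hp
        have hstep : StepR board w h (z.1 + dx, z.2 + dy) z := by
          refine ⟨mem_neighbors.mpr ⟨?_, ?_, ?_, ?_, ?_, hgr.1, hgr.2.1, hgr.2.2.1, hgr.2.2.2⟩, ?_⟩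
          · intro ⟨e1, e2⟩
            exact hcp (by rcases z with ⟨cx, cy⟩; simp only [Prod.mk.injEq] at e1 e2 ⊢; constructor <;> omega)
          · omega
          · omega
          · omega
          · omega
          · simp [isWalkable, hwk]
        exact Relation.ReflTransGen.tail (hst _ hp) hstep
    · exact hst z hz

theorem cellFold_true (board : List (List String)) :
    ∀ (cells : List (Int × Int)) (st : List (Int × Int) × Bool),
      st.2 = true → (cells.foldl (sweepStep board) st).2 = true := by
  intro cells
  induction cells with
  | nil => intro st h2; exact h2
  | cons c cs ih =>
    intro st h2
    simp only [List.foldl_cons]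
    apply ih
    unfold sweepStep
    split_ifs <;> simp [h2]

theorem cellFold_fix (board : List (List String)) :
    ∀ (cells : List (Int × Int)) (st : List (Int × Int) × Bool),
      (cells.foldl (sweepStep board) st).2 = false →
      (cells.foldl (sweepStep board) st).1 = st.1 ∧
        ∀ c ∈ cells,
          (!(st.1.contains c) && !(pvCell board c.1 c.2 == "W") && adjAny st.1 c.1 c.2) = false := by
  intro cells
  induction cells with
  | nil => intro st _; exact ⟨rfl, by simp⟩
  | cons c cs ih =>
    intro st hf
    simp only [List.foldl_cons] at hf ⊢
    by_cases hc : (!(st.1.contains c) && !(pvCell board c.1 c.2 == "W") && adjAny st.1 c.1 c.2) = true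
    · exfalso
      have hstep : (sweepStep board st c).2 = true := by
        unfold sweepStep; rw [if_pos hc]
      rw [cellFold_true board cs _ hstep] at hf
      cases hf
    · have hsame : sweepStep board st c = st := by
        unfold sweepStep
        rw [if_neg hc]
      rw [hsame] at hf ⊢
      obtain ⟨h1, h2⟩ := ih st hf
      refine ⟨h1, fun d hd => ?_⟩
      rcases List.mem_cons.mp hd with rfl | hd'
      · simpa using hc
      · exact h2 d hd'

theorem closureLoop_correct (board : List (List String)) (w h : Int) (goal : Int × Int) :
    ∀ (N : Nat) (reach : List (Int × Int)),
      unseenCount w h reach ≤ N →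
      goal ∈ reach →
      (∀ z ∈ reach, Reach board w h goal z) →
      ∀ t, (t ∈ closureLoop board w h reach ↔ Reach board w h goal t) := by
  intro N
  induction N with
  | zero =>
    intro reach hN hg hsnd t
    -- unseenCount reach = 0: a sweep cannot change anything, but argue directly on the loop
    rw [closureLoop]
    rw [sweep_eq_grid]
    cases hch : ((gridList w h).foldl (sweepStep board) (reach, false)).2 with
    | true =>
      exfalso
      have := (cellFold_measure board w h (gridList w h) (fun c hc => hc) (reach, false)).2 hch
      rcases this with h1 | h1
      · cases h1
      · have h2 : unseenCount w h ((gridList w h).foldl (sweepStep board) (reach, false)).1 <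
            unseenCount w h reach := h1
        omega
    | false =>
      simp only [if_false, Bool.false_eq_true]
      obtain ⟨hfix, hnone⟩ := cellFold_fix board (gridList w h) (reach, false) hch
      rw [hfix]
      constructor
      · intro ht; exact hsnd t ht
      · intro hr
        refine reach_mem_closed (S := reach) ?_ hg hr
        intro p hp n hn
        by_contra hnm
        have hng : n ∈ gridList w h := neighbors_subset_grid hn.1
        have := hnone n hng
        simp only [Bool.and_eq_false_iff, Bool.not_eq_false'] at this
        rcases this with (hcn | hwn) | hadjf
        · exact hnm (by simpa using hcn)
        · have : isWalkable (pvCell board n.1 n.2) = false := by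
            simp [isWalkable, hwn]
          rw [hn.2] at this; cases this
        · have hmm := mem_neighbors.mp hn.1
          have hadj : adjAny reach n.1 n.2 = true := by
            rw [adjAny_iff]
            refine ⟨p.1 - n.1, ?_, p.2 - n.2, ?_, ?_⟩
            · have : p.1 - n.1 = -1 ∨ p.1 - n.1 = 0 ∨ p.1 - n.1 = 1 := by
                have := hmm.2.1; have := hmm.2.2.1; omega
              simpa using this
            · have : p.2 - n.2 = -1 ∨ p.2 - n.2 = 0 ∨ p.2 - n.2 = 1 := by
                have := hmm.2.2.2.1; have := hmm.2.2.2.2.1; omega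
              simpa using this
            · have : (n.1 + (p.1 - n.1), n.2 + (p.2 - n.2)) = p := by
                rcases p with ⟨a, b⟩; simp only [Prod.mk.injEq]; constructor <;> omega
              rw [this]; exact hp
          rw [hadj] at hadjf; cases hadjf
  | succ N ih =>
    intro reach hN hg hsnd t
    rw [closureLoop]
    rw [sweep_eq_grid]
    cases hch : ((gridList w h).foldl (sweepStep board) (reach, false)).2 with
    | true =>
      simp only [if_true]
      have hm := cellFold_measure board w h (gridList w h) (fun c hc => hc) (reach, false)
      have hlt : unseenCount w h ((gridList w h).foldl (sweepStep board) (reach, false)).1 <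
          unseenCount w h reach := by
        rcases hm.2 hch with h1 | h1
        · cases h1
        · exact h1
      exact ih _ (by omega)
        (cellFold_mono board (gridList w h) (reach, false) goal hg)
        (cellFold_sound board w h goal (gridList w h) (fun c hc => hc) (reach, false) hsnd) t
    | false =>
      simp only [if_false, Bool.false_eq_true]
      obtain ⟨hfix, hnone⟩ := cellFold_fix board (gridList w h) (reach, false) hch
      rw [hfix]
      constructor
      · intro ht; exact hsnd t ht
      · intro hr
        refine reach_mem_closed (S := reach) ?_ hg hr
        intro p hp n hn
        by_contra hnm
        have hng : n ∈ gridList w h := neighbors_subset_grid hn.1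
        have := hnone n hng
        simp only [Bool.and_eq_false_iff, Bool.not_eq_false'] at this
        rcases this with (hcn | hwn) | hadjf
        · exact hnm (by simpa using hcn)
        · have : isWalkable (pvCell board n.1 n.2) = false := by
            simp [isWalkable, hwn]
          rw [hn.2] at this; cases this
        · have hmm := mem_neighbors.mp hn.1
          have hadj : adjAny reach n.1 n.2 = true := by
            rw [adjAny_iff]
            refine ⟨p.1 - n.1, ?_, p.2 - n.2, ?_, ?_⟩
            · have : p.1 - n.1 = -1 ∨ p.1 - n.1 = 0 ∨ p.1 - n.1 = 1 := by
                have := hmm.2.1; have := hmm.2.2.1; omega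
              simpa using this
            · have : p.2 - n.2 = -1 ∨ p.2 - n.2 = 0 ∨ p.2 - n.2 = 1 := by
                have := hmm.2.2.2.1; have := hmm.2.2.2.2.1; omega
              simpa using this
            · have : (n.1 + (p.1 - n.1), n.2 + (p.2 - n.2)) = p := by
                rcases p with ⟨a, b⟩; simp only [Prod.mk.injEq]; constructor <;> omega
              rw [this]; exact hp
          rw [hadj] at hadjf; cases hadjf

-- a cell that is in bounds and walkable
def Good (board : List (List String)) (w h : Int) (p : Int × Int) : Prop :=
  0 ≤ p.1 ∧ p.1 < w ∧ 0 ≤ p.2 ∧ p.2 < h ∧ isWalkable (pvCell board p.1 p.2) = true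

theorem step_symm {board : List (List String)} {w h : Int} {p q : Int × Int}
    (hp : Good board w h p) (hs : StepR board w h p q) :
    Good board w h q ∧ StepR board w h q p := by
  obtain ⟨hn, hw⟩ := hs
  obtain ⟨hb1, hb2, hb3, hb4, hb5, hb6, hb7, hb8, hb9⟩ := mem_neighbors.mp hn
  obtain ⟨hp1, hp2, hp3, hp4, hp5⟩ := hp
  refine ⟨⟨hb6, hb7, hb8, hb9, hw⟩,
    ⟨mem_neighbors.mpr ⟨?_, by omega, by omega, by omega, by omega, hp1, hp2, hp3, hp4⟩, hp5⟩⟩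
  omega

theorem reach_good {board : List (List String)} {w h : Int} {p q : Int × Int}
    (hp : Good board w h p) (hr : Reach board w h p q) : Good board w h q := by
  induction hr with
  | refl => exact hp
  | tail _ hstep ih => exact (step_symm ih hstep).1

theorem reach_symm {board : List (List String)} {w h : Int} {p q : Int × Int}
    (hp : Good board w h p) (hr : Reach board w h p q) : Reach board w h q p := by
  induction hr with
  | refl => exact Relation.ReflTransGen.refl
  | tail hab hstep ih =>
    exact Relation.ReflTransGen.head (step_symm (reach_good hp hab) hstep).2 ih

-- ---- the two symbol scans find the same positions ----

theorem startIndex_eq : startIndex = ⟨[("1", 0), ("2", 1), ("3", 2), ("4", 3)]⟩ := by rfl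

-- one lastPos fold step over a cell
def lpStep (board : List (List String)) (sym : String)
    (p : Option (Int × Int)) (c : Int × Int) : Option (Int × Int) :=
  if pvCell board c.1 c.2 == sym then some c else p

theorem lastPos_eq_grid (board : List (List String)) (w h : Int) (sym : String) :
    lastPos board w h sym = (gridList w h).foldl (lpStep board sym) none :=
  nested_fold_eq w h (lpStep board sym) none

-- A's scan fold step over a cell
def scanStep (board : List (List String))
    (st : Option (Int × Int) × List (Option (Int × Int))) (c : Int × Int) :
    Option (Int × Int) × List (Option (Int × Int)) :=
  if pvCell board c.1 c.2 == "G" then (some c, st.2)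
  else
    match startIndex.get? (pvCell board c.1 c.2) with
    | some i => (st.1, st.2.set i.toNat (some c))
    | none => st

theorem findGoalStarts_eq_grid (board : List (List String)) :
    findGoalStarts board =
      (((gridList (boardW board) (boardH board)).foldl (scanStep board)
          (none, [none, none, none, none])).1,
        ((gridList (boardW board) (boardH board)).foldl (scanStep board)
          (none, [none, none, none, none])).2.filterMap id) := by
  exact congrArg (fun r : Option (Int × Int) × List (Option (Int × Int)) =>
    (r.1, r.2.filterMap id))
    (nested_fold_eq (boardW board) (boardH board) (scanStep board)
      ((none : Option (Int × Int)), ([none, none, none, none] : List (Option (Int × Int)))))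

theorem scan_eq_lp (board : List (List String)) :
    ∀ (cells : List (Int × Int)) (g a b c d : Option (Int × Int)),
      cells.foldl (scanStep board) (g, [a, b, c, d]) =
        (cells.foldl (lpStep board "G") g,
          [cells.foldl (lpStep board "1") a, cells.foldl (lpStep board "2") b,
            cells.foldl (lpStep board "3") c, cells.foldl (lpStep board "4") d]) := by
  intro cells
  induction cells with
  | nil => intro g a b c d; rfl
  | cons p ps ih =>
    intro g a b c d
    simp only [List.foldl_cons]
    by_cases h1 : pvCell board p.1 p.2 = "G"
    · have : scanStep board (g, [a, b, c, d]) p = (some p, [a, b, c, d]) := by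
        unfold scanStep; rw [if_pos (by simp [h1])]
      rw [this, ih]
      simp [lpStep, h1]
    · by_cases h2 : pvCell board p.1 p.2 = "1"
      · have : scanStep board (g, [a, b, c, d]) p = (g, [some p, b, c, d]) := by
          unfold scanStep
          rw [if_neg (by simp [h1]), h2, show startIndex.get? "1" = some 0 from by rfl]
          rfl
        rw [this, ih]
        simp [lpStep, h2]
      · by_cases h3 : pvCell board p.1 p.2 = "2"
        · have : scanStep board (g, [a, b, c, d]) p = (g, [a, some p, c, d]) := by
            unfold scanStep
            rw [if_neg (by simp [h1]), h3, show startIndex.get? "2" = some 1 from by rfl]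
            rfl
          rw [this, ih]
          simp [lpStep, h3]
        · by_cases h4 : pvCell board p.1 p.2 = "3"
          · have : scanStep board (g, [a, b, c, d]) p = (g, [a, b, some p, d]) := by
              unfold scanStep
              rw [if_neg (by simp [h1]), h4, show startIndex.get? "3" = some 2 from by rfl]
              rfl
            rw [this, ih]
            simp [lpStep, h4]
          · by_cases h5 : pvCell board p.1 p.2 = "4"
            · have : scanStep board (g, [a, b, c, d]) p = (g, [a, b, c, some p]) := by
                unfold scanStep
                rw [if_neg (by simp [h1]), h5, show startIndex.get? "4" = some 3 from by rfl]
                rfl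
              rw [this, ih]
              simp [lpStep, h5]
            · have hnone : startIndex.get? (pvCell board p.1 p.2) = none := by
                rw [startIndex_eq]
                simp only [PySem.Dict.get?_mk_cons, beq_iff_eq,
                  if_neg (Ne.symm h2), if_neg (Ne.symm h3),
                  if_neg (Ne.symm h4), if_neg (Ne.symm h5)]
                rfl
              have : scanStep board (g, [a, b, c, d]) p = (g, [a, b, c, d]) := by
                unfold scanStep
                rw [if_neg (by simp [h1]), hnone]
              rw [this, ih]
              simp [lpStep, h1, h2, h3, h4, h5]

theorem scan_results_eq (board : List (List String)) :
    findGoalStarts board =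
      (lastPos board (boardW board) (boardH board) "G",
        (startSymbols.map (fun s => lastPos board (boardW board) (boardH board) s)).filterMap id) := by
  rw [findGoalStarts_eq_grid, scan_eq_lp]
  simp only [lastPos_eq_grid, startSymbols, List.map_cons, List.map_nil]

-- lastPos finds an in-bounds cell carrying exactly the searched symbol
theorem lastPos_spec (board : List (List String)) (w h : Int) (sym : String) :
    ∀ p, lastPos board w h sym = some p →
      0 ≤ p.1 ∧ p.1 < w ∧ 0 ≤ p.2 ∧ p.2 < h ∧ pvCell board p.1 p.2 = sym := by
  rw [lastPos_eq_grid]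
  have haux : ∀ (cells : List (Int × Int)), (∀ c ∈ cells, c ∈ gridList w h) →
      ∀ (acc : Option (Int × Int)),
        (∀ q, acc = some q → 0 ≤ q.1 ∧ q.1 < w ∧ 0 ≤ q.2 ∧ q.2 < h ∧ pvCell board q.1 q.2 = sym) →
        ∀ p, cells.foldl (lpStep board sym) acc = some p →
          0 ≤ p.1 ∧ p.1 < w ∧ 0 ≤ p.2 ∧ p.2 < h ∧ pvCell board p.1 p.2 = sym := by
    intro cells
    induction cells with
    | nil => intro _ acc hacc p hp; exact hacc p hp
    | cons c cs ih =>
      intro hcg acc hacc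
      simp only [List.foldl_cons]
      apply ih (fun d hd => hcg d (by simp [hd]))
      intro q hq
      unfold lpStep at hq
      split_ifs at hq with hc
      · injection hq with hq'
        subst hq'
        have := mem_gridList.mp (hcg c (by simp))
        exact ⟨this.1, this.2.1, this.2.2.1, this.2.2.2, by simpa using hc⟩
      · exact hacc q hq
  exact haux (gridList w h) (fun c hc => hc) none (by intro q hq; cases hq)

-- A's main tail and B's main tail as functions of the scan results
def mainA (board : List (List String)) (go : Option (Int × Int))
    (starts : List (Int × Int)) : Bool × List Int :=
  match go with
  | none => (true, [])
  | some goal =>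
    if starts = [] then (true, [])
    else
      let unreachable : List Int :=
        (PySem.List.enumerate starts 0).foldl (fun acc p =>
          if !(bfsA board p.2 goal) then acc ++ [p.1] else acc) []
      (unreachable.length == 0, unreachable)

def mainB (board : List (List String)) (go : Option (Int × Int))
    (starts : List (Int × Int)) : Bool × List Int :=
  match go with
  | none => (true, [])
  | some goal =>
    if starts = [] then (true, [])
    else
      let reach := closureLoop board (boardW board) (boardH board) [goal]
      let unreachable : List Int :=
        ((PySem.List.enumerate starts 0).filter (fun p => !(reach.contains p.2))).map (·.1)
      (unreachable.isEmpty, unreachable)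

theorem A_as_mainA (board : List (List String)) :
    check_pathability board = mainA board (findGoalStarts board).1 (findGoalStarts board).2 := rfl

theorem B_as_mainB (board : List (List String)) :
    check_pathability_alt board =
      mainB board (lastPos board (boardW board) (boardH board) "G")
        ((startSymbols.map (fun s => lastPos board (boardW board) (boardH board) s)).filterMap id) := rfl

theorem length_beq_zero_eq_isEmpty (u : List Int) : ((u.length == 0 : Bool)) = u.isEmpty := by
  cases u <;> rfl

theorem mains_eq (board : List (List String)) (go : Option (Int × Int))
    (starts : List (Int × Int))
    (hgo : ∀ g, go = some g →
      0 ≤ g.1 ∧ g.1 < boardW board ∧ 0 ≤ g.2 ∧ g.2 < boardH board ∧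
        pvCell board g.1 g.2 = "G")
    (hst : ∀ s ∈ starts, Good board (boardW board) (boardH board) s) :
    mainA board go starts = mainB board go starts := by
  cases go with
  | none => rfl
  | some g =>
    simp only [mainA, mainB]
    by_cases hSe : starts = []
    · rw [if_pos hSe, if_pos hSe]
    · rw [if_neg hSe, if_neg hSe]
      obtain ⟨hg1, hg2, hg3, hg4, hgc⟩ := hgo g rfl
      have hGoodg : Good board (boardW board) (boardH board) g :=
        ⟨hg1, hg2, hg3, hg4, by rw [hgc]; rfl⟩
      have hpt : ∀ pr ∈ PySem.List.enumerate starts 0,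
          (!(bfsA board pr.2 g)) =
          (!((closureLoop board (boardW board) (boardH board) [g]).contains pr.2)) := by
        intro pr hpr
        have hsS : pr.2 ∈ starts := by
          have hmm := List.mem_map_of_mem (f := fun (x : Int × (Int × Int)) => x.2) hpr
          rw [PySem.List.map_snd_enumerate] at hmm
          exact hmm
        have hGs := hst pr.2 hsS
        have hcore : bfsA board pr.2 g =
            (closureLoop board (boardW board) (boardH board) [g]).contains pr.2 := by
          have hb : bfsA board pr.2 g = true ↔
              Reach board (boardW board) (boardH board) pr.2 g := by
            unfold bfsA
            rw [if_neg (by omega)]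
            rw [loopA_correct board (boardW board) (boardH board) g
              (2 * unseenCount (boardW board) (boardH board) [pr.2] + 1) [pr.2] [pr.2]
              (by simp)
              (by intro p hp hnp; simp only [List.mem_singleton] at hp; subst hp
                  exact absurd List.mem_cons_self hnp)
              (fun p hp => hp)]
            constructor
            · rintro ⟨z, hz, hr⟩
              rw [List.mem_singleton] at hz
              subst hz
              exact hr
            · intro hr
              exact ⟨pr.2, List.mem_cons_self, hr⟩
          have hf : ((closureLoop board (boardW board) (boardH board) [g]).contains pr.2) = true ↔
              Reach board (boardW board) (boardH board) g pr.2 := by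
            rw [List.contains_iff_mem]
            exact closureLoop_correct board (boardW board) (boardH board) g
              (unseenCount (boardW board) (boardH board) [g]) [g] (le_refl _)
              List.mem_cons_self
              (by intro z hz; rw [List.mem_singleton] at hz; subst hz
                  exact Relation.ReflTransGen.refl) pr.2
          rw [Bool.eq_iff_iff, hb, hf]
          exact ⟨fun hr => reach_symm hGs hr, fun hr => reach_symm hGoodg hr⟩
        rw [hcore]
      have hlist : (PySem.List.enumerate starts 0).foldl
            (fun acc p => if !(bfsA board p.2 g) then acc ++ [p.1] else acc) [] =
          ((PySem.List.enumerate starts 0).filter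
            (fun p => !((closureLoop board (boardW board) (boardH board) [g]).contains p.2))).map (·.1) := by
        rw [PySem.List.foldl_append_if (fun (p : Int × (Int × Int)) => !(bfsA board p.2 g)) (fun p => p.1)
          (PySem.List.enumerate starts 0) []]
        rw [List.filter_congr hpt]
        simp
      rw [hlist, length_beq_zero_eq_isEmpty]

-- ===== VERDICT (by name: the statement is the Claim_ definition above) =====
theorem check_pathability_spec : Claim_equal_check_pathability := by
  intro board _ _
  unfold Spec_check_pathability
  rw [A_as_mainA, B_as_mainB, scan_results_eq]
  apply mains_eq
  · intro g hg
    exact lastPos_spec board (boardW board) (boardH board) "G" g hg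
  · intro s hs
    rw [List.mem_filterMap] at hs
    obtain ⟨o, ho, hoe⟩ := hs
    rw [List.mem_map] at ho
    obtain ⟨sym, hsym, rfl⟩ := ho
    obtain ⟨q1, q2, q3, q4, qc⟩ := lastPos_spec board (boardW board) (boardH board) sym s hoe
    have hsym' : sym = "1" ∨ sym = "2" ∨ sym = "3" ∨ sym = "4" := by
      simpa [startSymbols] using hsym
    refine ⟨q1, q2, q3, q4, ?_⟩
    rw [qc]
    rcases hsym' with rfl | rfl | rfl | rfl <;> rfl
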